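-- pv_equiv track=rewrite | github.com/Adhikram/Study_Resources | DSA/Python/Questions/Array/WaysToPartition.py | ways_to_partition
-- ===== SOURCE A (Python) =====
-- from typing import List
-- from collections import defaultdict
--
-- def ways_to_partition(nums: List[int], k: int) -> int:
--     total_sum = sum(nums)
--     sum_map = defaultdict(int)
--     right_sum = 0
--
--     # Build suffix map
--     for i in range(len(nums) - 1, 0, -1):
--         right_sum += nums[i]
--         target = total_sum - right_sum * 2 + k
--         sum_map[target] += 1
--
--     left_sum = 0
--     response = sum_map.get(nums[0], 0)
--     unchanged_count = 0
--
--     # Process each position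
--     for i in range(1, len(nums)):
--         left_sum += nums[i - 1]
--         if left_sum * 2 == total_sum:
--             unchanged_count += 1
--
--         target = total_sum - left_sum * 2
--         sum_map[target + k] = sum_map.get(target + k, 0) + 1
--         sum_map[-target + k] = sum_map.get(-target + k, 0) - 1
--         response = max(response, sum_map.get(nums[i], 0))
--
--     return max(response, unchanged_count)
-- ===== SOURCE B (Python) =====
-- from typing import List
-- from bisect import bisect_left
--
-- def ways_to_partition(nums: List[int], k: int) -> int:
--     total = sum(nums)
--     # pivot value of split point j (left part = nums[:j+1]): total - 2*prefix
--     pivots = []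
--     s = 0
--     for x in nums[:-1]:
--         s += x
--         pivots.append(total - 2 * s)
--     # index of pivot positions grouped by value (each list ascending)
--     pos = {}
--     for j, v in enumerate(pivots):
--         pos.setdefault(v, []).append(j)
--     best = len(pos.get(0, []))  # no-replacement answer
--     for i, x in enumerate(nums):
--         d = k - x
--         left = bisect_left(pos.get(-d, []), i)          # splits j < i balanced by the change
--         rl = pos.get(d, [])
--         right = len(rl) - bisect_left(rl, i)            # splits j >= i balanced by the change
--         best = max(best, left + right)
--     return best
-- ===== Notes on version B (the rewrite author's own statement) =====
-- stated objective: alternative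
-- what changed: B drops A's mutable counting dict updated during the sweep entirely: it precomputes a group-by index (pivot value -> ascending list of split positions) in a staged pass, counts the no-replacement answer from that index, and answers each position's query by binary search (bisect_left) on the two relevant position lists instead of maintaining and re-keying counters.
import Mathlib
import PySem

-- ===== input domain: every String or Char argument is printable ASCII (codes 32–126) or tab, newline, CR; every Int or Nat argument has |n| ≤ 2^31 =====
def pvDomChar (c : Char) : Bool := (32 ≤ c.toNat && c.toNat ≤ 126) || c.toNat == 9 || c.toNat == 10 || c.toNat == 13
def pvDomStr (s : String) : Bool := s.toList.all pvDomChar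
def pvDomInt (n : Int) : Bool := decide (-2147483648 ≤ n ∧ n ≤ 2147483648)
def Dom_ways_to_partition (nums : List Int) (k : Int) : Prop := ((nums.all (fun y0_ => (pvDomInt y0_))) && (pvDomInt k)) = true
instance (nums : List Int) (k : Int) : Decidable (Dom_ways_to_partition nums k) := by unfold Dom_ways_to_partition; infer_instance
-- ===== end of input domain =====

-- B replaces A's mutable counting dict (re-keyed during the sweep) by a precomputed value->positions index queried by binary search; alternative algorithm, return value proved equal on nonempty input.


-- ===== PORT A =====
-- literal transliteration of A: one defaultdict built from the right, re-keyed in place during the left-to-right sweep.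
-- (nums[i] inside the loops is always in range, so pyGetD is exact there; nums[0] raises on [] — excluded by Pre_.)
def ways_to_partition (nums : List Int) (k : Int) : Int :=
  let total := nums.sum
  let bs : Int × PySem.Dict Int Int :=
    (PySem.List.pyRange ((nums.length : Int) - 1) 0 (-1)).foldl
      (fun st i =>
        let rs := st.1 + PySem.List.pyGetD nums i 0
        (rs, st.2.modify (total - rs * 2 + k) 0 (· + 1)))
      (0, PySem.Dict.empty)
  let sum_map := bs.2
  let response := sum_map.getD (PySem.List.pyGetD nums 0 0) 0
  let fs : Int × PySem.Dict Int Int × Int × Int :=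
    (PySem.List.pyRange 1 (nums.length : Int)).foldl
      (fun st i =>
        let ls := st.1 + PySem.List.pyGetD nums (i - 1) 0
        let u := if ls * 2 = total then st.2.2.2 + 1 else st.2.2.2
        let target := total - ls * 2
        let m1 := st.2.1.insert (target + k) (st.2.1.getD (target + k) 0 + 1)
        let m2 := m1.insert (-target + k) (m1.getD (-target + k) 0 - 1)
        let r := max st.2.2.1 (m2.getD (PySem.List.pyGetD nums i 0) 0)
        (ls, m2, r, u))
      (0, sum_map, response, 0)
  max fs.2.2.1 fs.2.2.2


-- ===== PORT B =====
-- literal transliteration of B (Source B): pivot list, group-by index pos : value -> ascending list of split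
-- positions, no-replacement count from pos[0], then per index two bisect_left queries.
-- bisect_left on an ascending list is ported by its contract: length of the (< key) prefix, i.e.
-- (takeWhile (· < key)).length — exact for the sorted lists Source B builds (positions appended in increasing order).
def ways_to_partition_alt (nums : List Int) (k : Int) : Int :=
  let total := nums.sum
  let sp : Int × List Int :=
    (PySem.List.slice nums none (some (-1))).foldl
      (fun st x =>
        let s := st.1 + x
        (s, st.2 ++ [total - 2 * s]))
      (0, [])
  let pivots := sp.2
  let pos : PySem.Dict Int (List Int) :=
    (PySem.List.enumerate pivots).foldl
      (fun d p => d.modify p.2 [] (· ++ [p.1])) PySem.Dict.empty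
  let best0 : Int := ((pos.getD 0 []).length : Int)
  (PySem.List.enumerate nums).foldl
    (fun best p =>
      let d := k - p.2
      let left : Int := (((pos.getD (-d) []).takeWhile (fun a => a < p.1)).length : Int)
      let rl := pos.getD d []
      let right : Int := (rl.length : Int) - ((rl.takeWhile (fun a => a < p.1)).length : Int)
      max best (left + right))
    best0


-- ===== PRECONDITION & SPEC =====
-- Pre_ excludes exactly the empty list, on which A raises IndexError at nums[0].
def Pre_ways_to_partition (nums : List Int) (k : Int) : Prop := nums ≠ []
instance (nums : List Int) (k : Int) : Decidable (Pre_ways_to_partition nums k) := by unfold Pre_ways_to_partition; infer_instance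
def pvWitness_ways_to_partition : List Int × Int := ([1, 2, 3], 2)

def Spec_ways_to_partition (nums : List Int) (k : Int) (out : Int) : Prop := out = ways_to_partition_alt nums k
instance (nums : List Int) (k : Int) (out : Int) : Decidable (Spec_ways_to_partition nums k out) := by unfold Spec_ways_to_partition; infer_instance

-- ===== CLAIM (what is proved, stated in full; the proofs are below) =====
def Claim_equal_ways_to_partition : Prop := ∀ (nums : List Int) (k : Int), Dom_ways_to_partition nums k → Pre_ways_to_partition nums k → Spec_ways_to_partition nums k (ways_to_partition nums k)

-- ===== LEMMAS AND PROOFS =====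

def pvPre (nums : List Int) (t : Nat) : Int := (nums.take t).sum
def pvPiv (nums : List Int) : List Int :=
  (List.range (nums.length - 1)).map (fun j => nums.sum - 2 * pvPre nums (j + 1))
def pvQ (nums : List Int) (k : Int) (i : Nat) : Int :=
  (((pvPiv nums).take i).count (nums.getD i 0 - k) : Int)
    + (((pvPiv nums).drop i).count (k - nums.getD i 0) : Int)
def pvUnch (nums : List Int) : Int := ((pvPiv nums).count 0 : Int)

lemma pvPiv_length (nums : List Int) : (pvPiv nums).length = nums.length - 1 := by simp [pvPiv]
lemma pvPiv_getElem (nums : List Int) (j : Nat) (h : j < nums.length - 1) :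
    (pvPiv nums)[j]'(by simp [pvPiv_length, h]) = nums.sum - 2 * pvPre nums (j + 1) := by
  simp [pvPiv]
lemma pvPre_succ (nums : List Int) (t : Nat) (h : t < nums.length) :
    pvPre nums (t + 1) = pvPre nums t + nums.getD t 0 := by
  simp only [pvPre, List.take_add_one, List.getElem?_eq_getElem h, List.getD, Option.toList_some,
    List.sum_append, List.sum_cons, List.sum_nil, Option.getD_some, add_zero]

lemma piv_take_succ (nums : List Int) (t : Nat) (h : t < nums.length - 1) :
    (pvPiv nums).take (t + 1)
      = (pvPiv nums).take t ++ [nums.sum - 2 * pvPre nums (t + 1)] := by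
  rw [List.take_add_one, List.getElem?_eq_getElem (by rw [pvPiv_length]; omega),
    pvPiv_getElem nums t h]
  simp

lemma piv_drop_cons (nums : List Int) (t : Nat) (h : t < nums.length - 1) :
    (pvPiv nums).drop t
      = (nums.sum - 2 * pvPre nums (t + 1)) :: (pvPiv nums).drop (t + 1) := by
  rw [List.drop_eq_getElem_cons (by rw [pvPiv_length]; omega), pvPiv_getElem nums t h]

lemma sum_drop_succ (nums : List Int) (a : Nat) (h : a < nums.length) :
    (nums.drop a).sum = (nums.drop (a + 1)).sum + nums.getD a 0 := by
  rw [List.drop_eq_getElem_cons h]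
  simp only [List.sum_cons, List.getD, List.getElem?_eq_getElem h, Option.getD_some]
  ring

lemma sum_take_add_drop (nums : List Int) (a : Nat) :
    pvPre nums a + (nums.drop a).sum = nums.sum := by
  rw [pvPre, ← List.sum_append, List.take_append_drop]

lemma buildA (nums : List Int) (k : Int) : ∀ (a : Nat), a < nums.length →
    ∀ (m : PySem.Dict Int Int) (x : Int),
    (((PySem.List.pyRange (a : Int) 0 (-1)).foldl
      (fun st i =>
        let rs := st.1 + PySem.List.pyGetD nums i 0
        (rs, st.2.modify (nums.sum - rs * 2 + k) 0 (· + 1)))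
      ((nums.drop (a + 1)).sum, m)).2).getD x 0
      = m.getD x 0 + (((pvPiv nums).take a).map (fun v => k - v)).count x := by
  intro a
  induction a with
  | zero =>
    intro _ m x
    have h0 : PySem.List.pyRange (0 : Int) 0 (-1) = [] := by decide
    simp [h0]
  | succ a ih =>
    intro ha m x
    have hcons : PySem.List.pyRange ((a + 1 : Nat) : Int) 0 (-1)
        = ((a + 1 : Nat) : Int) :: PySem.List.pyRange (((a + 1 : Nat) : Int) - 1) 0 (-1) :=
      PySem.List.pyRange_neg_one_cons (by positivity)
    have hcast : (((a + 1 : Nat) : Int) - 1) = (a : Int) := by push_cast; ring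
    rw [hcons, hcast, List.foldl_cons]
    simp only
    have hget : PySem.List.pyGetD nums ((a + 1 : Nat) : Int) 0 = nums.getD (a + 1) 0 := by
      rw [PySem.List.pyGetD_of_nonneg nums 0 (by positivity)]
      simp
    have hrs : (nums.drop (a + 1 + 1)).sum + PySem.List.pyGetD nums ((a + 1 : Nat) : Int) 0
        = (nums.drop (a + 1)).sum := by
      rw [hget, ← sum_drop_succ nums (a + 1) ha]
    rw [hrs, ih (by omega)]
    have hkey : nums.sum - (nums.drop (a + 1)).sum * 2 + k
        = k - (nums.sum - 2 * pvPre nums (a + 1)) := by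
      have := sum_take_add_drop nums (a + 1)
      linarith
    rw [PySem.Dict.getD_modify, hkey]
    have htake : (pvPiv nums).take (a + 1)
        = (pvPiv nums).take a ++ [nums.sum - 2 * pvPre nums (a + 1)] := by
      rw [List.take_add_one, List.getElem?_eq_getElem (by rw [pvPiv_length]; omega)]
      rw [pvPiv_getElem nums a (by omega)]
      simp
    rw [htake, List.map_append, List.count_append]
    by_cases h : x = k - (nums.sum - 2 * pvPre nums (a + 1))
    · rw [if_pos h, h]
      simp only [List.map_cons, List.map_nil, List.count_singleton, BEq.rfl, if_true]
      push_cast; ring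
    · rw [if_neg h]
      have h2 : List.count x (List.map (fun v => k - v)
          [nums.sum - 2 * pvPre nums (a + 1)]) = 0 := by
        simp only [List.map_cons, List.map_nil, List.count_cons, List.count_nil]
        simp [Ne.symm h]
      rw [h2]
      push_cast; ring

lemma pivFold (total : Int) : ∀ (l : List Int) (s : Int) (acc : List Int),
    (l.foldl (fun st x =>
        let s' := st.1 + x
        (s', st.2 ++ [total - 2 * s'])) (s, acc))
      = (s + l.sum, acc ++ (List.range l.length).map
          (fun j => total - 2 * (s + (l.take (j + 1)).sum))) := by
  intro l
  induction l with
  | nil => intro s acc; simp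
  | cons x xs ih =>
    intro s acc
    simp only [List.foldl_cons, ih (s + x) (acc ++ [total - 2 * (s + x)]), List.length_cons,
      List.sum_cons, List.range_succ_eq_map, List.map_cons, List.map_map]
    refine Prod.ext (by simp; ring) ?_
    simp only [List.append_assoc, List.singleton_append]
    refine congrArg (acc ++ ·) (List.cons_eq_cons.mpr ⟨?_, ?_⟩)
    · simp [List.take_succ_cons]
    · apply List.map_congr_left
      intro j hj
      simp only [Function.comp, List.take_succ_cons, List.sum_cons]
      ring_nf

lemma pivots_eq (nums : List Int) :
    ((PySem.List.slice nums none (some (-1))).foldl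
      (fun st x =>
        let s := st.1 + x
        (s, st.2 ++ [nums.sum - 2 * s])) ((0 : Int), ([] : List Int))).2 = pvPiv nums := by
  rw [PySem.List.slice_to_neg_one, pivFold, pvPiv]
  simp only [List.nil_append, List.length_dropLast]
  apply List.map_congr_left
  intro j hj
  simp only [List.mem_range] at hj
  rw [List.dropLast_eq_take, List.take_take]
  have : min (j + 1) (nums.length - 1) = j + 1 := by omega
  rw [this]
  simp [pvPre]

lemma dict2_step (T k x : Int) (A1 A2 B1 B2 : Int → Int) (M : Int → Int)
    (h1 : ∀ y, B1 y = A1 y + (if T = y then 1 else 0))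
    (h2 : ∀ y, A2 y = (if T = y then 1 else 0) + B2 y)
    (hM : ∀ y, M y = A1 (y - k) + A2 (k - y)) :
    (if x = -T + k then
        (if -T + k = T + k then M (T + k) + 1 else M (-T + k)) - 1
      else if x = T + k then M (T + k) + 1 else M x)
      = B1 (x - k) + B2 (k - x) := by
  have n1 : T + k - k = T := by ring
  have n2 : k - (T + k) = -T := by ring
  have n3 : -T + k - k = -T := by ring
  have n4 : k - (-T + k) = T := by ring
  by_cases hx1 : x = -T + k
  · rw [if_pos hx1]
    by_cases hK : -T + k = T + k
    · have hT : T = 0 := by omega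
      have ex1 : x - k = T := by omega
      have ex2 : k - x = T := by omega
      rw [if_pos hK, hM (T + k), n1, n2, h1 (x - k), h2 (-T), ex1, ex2]
      have : A1 T = A1 (x - k) := by rw [ex1]
      simp [hT] at *
      omega
    · have hT : T ≠ 0 := by omega
      have ex1 : x - k = -T := by omega
      have ex2 : k - x = T := by omega
      rw [if_neg hK, hM (-T + k), n3, n4, h1 (x - k), h2 T, ex1, ex2]
      have hne : ¬ (T = -T) := by omega
      simp [hne]
      ring
  · rw [if_neg hx1]
    by_cases hx2 : x = T + k
    · have hT : T ≠ 0 := by omega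
      have ex1 : x - k = T := by omega
      have ex2 : k - x = -T := by omega
      rw [if_pos hx2, hM (T + k), n1, n2, h1 (x - k), h2 (-T), ex1, ex2]
      have hne : ¬ (T = -T) := by omega
      simp [hne]
      ring
    · have e1 : ¬ (T = x - k) := by omega
      have e2 : ¬ (T = k - x) := by omega
      rw [if_neg hx2, hM x, h1 (x - k), h2 (k - x)]
      simp [e1, e2]

lemma stepA (nums : List Int) (k : Int) (t : Nat) (h1 : 1 ≤ t) (htn : t + 1 ≤ nums.length)
    (S : Int × PySem.Dict Int Int × Int × Int)
    (e1 : S.1 = pvPre nums (t - 1))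
    (e2 : ∀ x : Int, S.2.1.getD x 0 = (((pvPiv nums).take (t - 1)).count (x - k) : Int)
            + (((pvPiv nums).drop (t - 1)).count (k - x) : Int))
    (e3 : S.2.2.1 = List.foldl max (pvQ nums k 0)
            ((List.range (t - 1)).map (fun j => pvQ nums k (j + 1))))
    (e4 : S.2.2.2 = (((pvPiv nums).take (t - 1)).count 0 : Int)) :
    (S.1 + PySem.List.pyGetD nums ((t : Int) - 1) 0 = pvPre nums t)
    ∧ (∀ x : Int,
        (((S.2.1.insert (nums.sum - (S.1 + PySem.List.pyGetD nums ((t : Int) - 1) 0) * 2 + k)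
            (S.2.1.getD (nums.sum - (S.1 + PySem.List.pyGetD nums ((t : Int) - 1) 0) * 2 + k) 0 + 1)).insert
          (-(nums.sum - (S.1 + PySem.List.pyGetD nums ((t : Int) - 1) 0) * 2) + k)
          ((S.2.1.insert (nums.sum - (S.1 + PySem.List.pyGetD nums ((t : Int) - 1) 0) * 2 + k)
            (S.2.1.getD (nums.sum - (S.1 + PySem.List.pyGetD nums ((t : Int) - 1) 0) * 2 + k) 0 + 1)).getD
              (-(nums.sum - (S.1 + PySem.List.pyGetD nums ((t : Int) - 1) 0) * 2) + k) 0 - 1)).getD x 0)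
          = (((pvPiv nums).take t).count (x - k) : Int)
            + (((pvPiv nums).drop t).count (k - x) : Int))
    ∧ (max S.2.2.1
        (((S.2.1.insert (nums.sum - (S.1 + PySem.List.pyGetD nums ((t : Int) - 1) 0) * 2 + k)
            (S.2.1.getD (nums.sum - (S.1 + PySem.List.pyGetD nums ((t : Int) - 1) 0) * 2 + k) 0 + 1)).insert
          (-(nums.sum - (S.1 + PySem.List.pyGetD nums ((t : Int) - 1) 0) * 2) + k)
          ((S.2.1.insert (nums.sum - (S.1 + PySem.List.pyGetD nums ((t : Int) - 1) 0) * 2 + k)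
            (S.2.1.getD (nums.sum - (S.1 + PySem.List.pyGetD nums ((t : Int) - 1) 0) * 2 + k) 0 + 1)).getD
              (-(nums.sum - (S.1 + PySem.List.pyGetD nums ((t : Int) - 1) 0) * 2) + k) 0 - 1)).getD
            (PySem.List.pyGetD nums (t : Int) 0) 0)
        = List.foldl max (pvQ nums k 0) ((List.range t).map (fun j => pvQ nums k (j + 1))))
    ∧ ((if (S.1 + PySem.List.pyGetD nums ((t : Int) - 1) 0) * 2 = nums.sum
          then S.2.2.2 + 1 else S.2.2.2)
        = (((pvPiv nums).take t).count 0 : Int)) := by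
  have hidx : ((t : Int) - 1) = ((t - 1 : Nat) : Int) := by push_cast [h1]; ring
  have hget1 : PySem.List.pyGetD nums ((t : Int) - 1) 0 = nums.getD (t - 1) 0 := by
    rw [hidx, PySem.List.pyGetD_of_nonneg nums 0 (by positivity)]; simp
  have hls : S.1 + PySem.List.pyGetD nums ((t : Int) - 1) 0 = pvPre nums t := by
    rw [e1, hget1, ← pvPre_succ nums (t - 1) (by omega)]
    congr 1; omega
  have hgt : PySem.List.pyGetD nums (t : Int) 0 = nums.getD t 0 := by
    rw [PySem.List.pyGetD_of_nonneg nums 0 (by positivity)]; simp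
  have htake := piv_take_succ nums (t - 1) (by omega)
  have hdrop := piv_drop_cons nums (t - 1) (by omega)
  rw [show t - 1 + 1 = t from by omega] at htake hdrop
  have hPT : nums.sum - 2 * pvPre nums t = nums.sum - pvPre nums t * 2 := by ring
  rw [hPT] at htake hdrop
  have h1' : ∀ y : Int, (((pvPiv nums).take t).count y : Int)
      = (((pvPiv nums).take (t - 1)).count y : Int)
        + (if nums.sum - pvPre nums t * 2 = y then 1 else 0) := by
    intro y
    rw [htake]
    push_cast [List.count_append, List.count_cons, List.count_nil, beq_iff_eq]
    split_ifs <;> omega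
  have h2' : ∀ y : Int, (((pvPiv nums).drop (t - 1)).count y : Int)
      = (if nums.sum - pvPre nums t * 2 = y then 1 else 0)
        + (((pvPiv nums).drop t).count y : Int) := by
    intro y
    rw [hdrop]
    push_cast [List.count_cons, beq_iff_eq]
    split_ifs <;> omega
  rw [hls]
  have hmap : ∀ x : Int,
      (((S.2.1.insert (nums.sum - pvPre nums t * 2 + k)
          (S.2.1.getD (nums.sum - pvPre nums t * 2 + k) 0 + 1)).insert
        (-(nums.sum - pvPre nums t * 2) + k)
        ((S.2.1.insert (nums.sum - pvPre nums t * 2 + k)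
          (S.2.1.getD (nums.sum - pvPre nums t * 2 + k) 0 + 1)).getD
            (-(nums.sum - pvPre nums t * 2) + k) 0 - 1)).getD x 0)
        = (((pvPiv nums).take t).count (x - k) : Int)
          + (((pvPiv nums).drop t).count (k - x) : Int) := by
    intro x
    rw [PySem.Dict.getD_insert, PySem.Dict.getD_insert, PySem.Dict.getD_insert]
    exact dict2_step (nums.sum - pvPre nums t * 2) k x
      (fun y => (((pvPiv nums).take (t - 1)).count y : Int))
      (fun y => (((pvPiv nums).drop (t - 1)).count y : Int))
      (fun y => (((pvPiv nums).take t).count y : Int))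
      (fun y => (((pvPiv nums).drop t).count y : Int))
      (fun y => S.2.1.getD y 0) h1' h2' e2
  refine ⟨rfl, hmap, ?_, ?_⟩
  · rw [hmap (PySem.List.pyGetD nums (t : Int) 0), hgt, e3]
    have hr : (List.range t).map (fun j => pvQ nums k (j + 1))
        = (List.range (t - 1)).map (fun j => pvQ nums k (j + 1)) ++ [pvQ nums k t] := by
      conv_lhs => rw [show t = (t - 1) + 1 from by omega, List.range_succ]
      rw [List.map_append]
      simp only [List.map_cons, List.map_nil]
      rw [show t - 1 + 1 = t from by omega]
    rw [hr, List.foldl_append, List.foldl_cons, List.foldl_nil]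
    simp [pvQ]
  · rw [e4, h1' 0]
    split_ifs with ha hb hb <;> try rfl
    · exfalso; omega
    · exfalso; omega

lemma sweepA_gen (nums : List Int) (k : Int) (M0 : PySem.Dict Int Int)
    (hM0 : ∀ x : Int, M0.getD x 0 = ((pvPiv nums).count (k - x) : Int)) :
    ∀ (t : Nat), 1 ≤ t → t ≤ nums.length →
    (let F := (PySem.List.pyRange 1 (t : Int)).foldl
      (fun st i =>
        let ls := st.1 + PySem.List.pyGetD nums (i - 1) 0
        let u := if ls * 2 = nums.sum then st.2.2.2 + 1 else st.2.2.2
        let target := nums.sum - ls * 2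
        let m1 := st.2.1.insert (target + k) (st.2.1.getD (target + k) 0 + 1)
        let m2 := m1.insert (-target + k) (m1.getD (-target + k) 0 - 1)
        let r := max st.2.2.1 (m2.getD (PySem.List.pyGetD nums i 0) 0)
        (ls, m2, r, u))
      ((0 : Int), M0, M0.getD (PySem.List.pyGetD nums 0 0) 0, (0 : Int))
     F.1 = pvPre nums (t - 1)
       ∧ (∀ x : Int, F.2.1.getD x 0 = (((pvPiv nums).take (t - 1)).count (x - k) : Int)
            + (((pvPiv nums).drop (t - 1)).count (k - x) : Int))
       ∧ F.2.2.1 = List.foldl max (pvQ nums k 0)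
            ((List.range (t - 1)).map (fun j => pvQ nums k (j + 1)))
       ∧ F.2.2.2 = (((pvPiv nums).take (t - 1)).count 0 : Int)) := by
  intro t ht
  induction t, ht using Nat.le_induction with
  | base =>
    intro h1
    have h0 : PySem.List.pyRange 1 (1 : Int) = [] := by decide
    simp only [Nat.cast_one, h0, List.foldl_nil]
    refine ⟨by simp [pvPre], ?_, ?_, by simp⟩
    · intro x
      simp only [Nat.sub_self, List.take_zero, List.count_nil, List.drop_zero, Nat.cast_zero,
        hM0 x, zero_add]
    · have hg : PySem.List.pyGetD nums 0 0 = nums.getD 0 0 := by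
        rw [PySem.List.pyGetD_of_nonneg nums 0 le_rfl]; rfl
      simp [pvQ, hg, hM0]
  | succ t h1 ih =>
    intro htn
    have hstep : PySem.List.pyRange 1 ((t + 1 : Nat) : Int)
        = PySem.List.pyRange 1 (t : Int) ++ [(t : Int)] := by
      push_cast
      exact PySem.List.pyRange_one_succ_right (by exact_mod_cast h1)
    simp only [hstep, List.foldl_append, List.foldl_cons, List.foldl_nil]
    obtain ⟨e1, e2, e3, e4⟩ := ih (by omega)
    obtain ⟨o1, o2, o3, o4⟩ := stepA nums k t h1 htn _ e1 e2 e3 e4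
    exact ⟨o1, o2, o3, o4⟩

lemma A_closed (nums : List Int) (k : Int) (hne : nums ≠ []) :
    ways_to_partition nums k
      = max (List.foldl max (pvQ nums k 0)
          ((List.range (nums.length - 1)).map (fun j => pvQ nums k (j + 1)))) (pvUnch nums) := by
  have hn : 1 ≤ nums.length := by
    have := List.length_pos_of_ne_nil hne; omega
  unfold ways_to_partition
  dsimp only
  have hM0 : ∀ x : Int,
      ((PySem.List.pyRange ((nums.length : Int) - 1) 0 (-1)).foldl
        (fun st i =>
          (st.1 + PySem.List.pyGetD nums i 0,
           st.2.modify (nums.sum - (st.1 + PySem.List.pyGetD nums i 0) * 2 + k) 0 (· + 1)))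
        (0, PySem.Dict.empty)).2.getD x 0
      = ((pvPiv nums).count (k - x) : Int) := by
    intro x
    have hc : ((nums.length : Int) - 1) = ((nums.length - 1 : Nat) : Int) := by omega
    have hz : ((0 : Int), (PySem.Dict.empty : PySem.Dict Int Int))
        = ((nums.drop (nums.length - 1 + 1)).sum, (PySem.Dict.empty : PySem.Dict Int Int)) := by
      rw [show nums.length - 1 + 1 = nums.length from by omega, List.drop_length]; rfl
    rw [hc, hz]
    have hb := buildA nums k (nums.length - 1) (by omega) PySem.Dict.empty x
    dsimp only at hb
    rw [hb, List.take_of_length_le (le_of_eq (pvPiv_length nums))]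
    rw [PySem.Dict.getD_empty]
    have : x = (fun v => k - v) (k - x) := by simp
    rw [this, List.count_map_of_injective _ _ (fun a b h => by omega)]
    simp
  obtain ⟨e1, e2, e3, e4⟩ := sweepA_gen nums k _ hM0 nums.length hn le_rfl
  dsimp only at e3 e4
  rw [e3, e4, List.take_of_length_le (by rw [pvPiv_length])]
  rfl

-- ---------- B side: the position index ----------

-- the list of indices (as Ints, starting at s) at which xs carries the value v
def pvIdx (xs : List Int) (s : Int) (v : Int) : List Int :=
  ((PySem.List.enumerate xs s).filter (fun p => p.2 == v)).map (·.1)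

lemma pvIdx_nil (s v : Int) : pvIdx [] s v = [] := by
  simp [pvIdx, PySem.List.enumerate_nil]

lemma pvIdx_cons (x : Int) (xs : List Int) (s v : Int) :
    pvIdx (x :: xs) s v = (if x == v then [s] else []) ++ pvIdx xs (s + 1) v := by
  simp only [pvIdx, PySem.List.enumerate_cons, List.filter_cons]
  by_cases h : x == v
  · simp [h]
  · simp [h]

lemma pvIdx_length (xs : List Int) : ∀ (s v : Int), (pvIdx xs s v).length = xs.count v := by
  induction xs with
  | nil => intro s v; simp [pvIdx_nil]
  | cons x xs ih =>
    intro s v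
    rw [pvIdx_cons, List.length_append, ih (s + 1) v, List.count_cons]
    by_cases hx : x = v
    · simp [hx]
      omega
    · simp [hx]

lemma pvIdx_takeWhile_nil (xs : List Int) : ∀ (s b v : Int), b ≤ s →
    (pvIdx xs s v).takeWhile (fun a => a < b) = [] := by
  induction xs with
  | nil => intro s b v _; simp [pvIdx_nil]
  | cons x xs ih =>
    intro s b v hbs
    rw [pvIdx_cons]
    by_cases h : x == v
    · rw [if_pos h, List.singleton_append, List.takeWhile_cons]
      have : ¬ ((s : Int) < b) := by omega
      simp [this]
    · rw [if_neg h, List.nil_append]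
      exact ih (s + 1) b v (by omega)

lemma pvIdx_bisect (xs : List Int) : ∀ (s t : Nat) (v : Int),
    (((pvIdx xs (s : Int) v).takeWhile (fun a => a < ((s + t : Nat) : Int))).length : Int)
      = ((xs.take t).count v : Int) := by
  induction xs with
  | nil => intro s t v; simp [pvIdx_nil]
  | cons x xs ih =>
    intro s t v
    rw [pvIdx_cons]
    cases t with
    | zero =>
      have hb : ((s + 0 : Nat) : Int) ≤ (s : Int) := by push_cast; omega
      by_cases h : x == v
      · rw [if_pos h, List.singleton_append, List.takeWhile_cons]
        have hns : ¬ ((s : Int) < ((s + 0 : Nat) : Int)) := by push_cast; omega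
        simp [hns]
      · rw [if_neg h, List.nil_append, pvIdx_takeWhile_nil xs (s + 1) _ v (by push_cast; omega)]
        simp
    | succ t =>
      have hs1 : ((s : Int) + 1) = (((s + 1 : Nat)) : Int) := by push_cast; ring
      have hcast : ((s + (t + 1) : Nat) : Int) = (((s + 1) + t : Nat) : Int) := by push_cast; ring
      by_cases h : x == v
      · rw [if_pos h, List.singleton_append,
          List.takeWhile_cons_of_pos (by simp only [decide_eq_true_eq]; push_cast; omega), List.length_cons, hs1, hcast,
          Nat.cast_add, Nat.cast_one, ih (s + 1) t v, List.take_succ_cons, List.count_cons]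
        have hx : x = v := by simpa using h
        simp only [hx, beq_self_eq_true, if_true]
        push_cast
        ring
      · rw [if_neg h, List.nil_append, hs1, hcast, ih (s + 1) t v, List.take_succ_cons,
          List.count_cons]
        have hx : ¬ (x = v) := by simpa using h
        simp [hx]

-- the grouping fold builds exactly the pvIdx lists
lemma pos_getD (pivots : List Int) (v : Int) :
    (((PySem.List.enumerate pivots).foldl
        (fun d p => d.modify p.2 [] (· ++ [p.1])) (PySem.Dict.empty : PySem.Dict Int (List Int))).getD v [])
      = pvIdx pivots 0 v := by
  have hswap : ((PySem.List.enumerate pivots).foldl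
        (fun d p => d.modify p.2 [] (· ++ [p.1])) (PySem.Dict.empty : PySem.Dict Int (List Int)))
      = (((PySem.List.enumerate pivots).map (fun p => (p.2, p.1))).foldl
        (fun d p => d.modify p.1 [] (· ++ [p.2])) PySem.Dict.empty) := by
    rw [List.foldl_map]
  rw [hswap, PySem.Dict.getD_foldl_modify_append, PySem.Dict.getD_empty, List.nil_append,
    List.filter_map, List.map_map, pvIdx]
  rfl

-- per-index value of B's query
lemma B_query (nums : List Int) (k : Int) (j : Nat) (hj : j < nums.length) :
    (((pvIdx (pvPiv nums) 0 (-(k - nums[j]))).takeWhile (fun a => a < ((j : Nat) : Int))).length : Int)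
      + ((((pvIdx (pvPiv nums) 0 (k - nums[j])).length : Nat) : Int)
        - (((pvIdx (pvPiv nums) 0 (k - nums[j])).takeWhile (fun a => a < ((j : Nat) : Int))).length : Int))
      = pvQ nums k j := by
  have hg : nums.getD j 0 = nums[j] := by simp [List.getD, List.getElem?_eq_getElem hj]
  have hneg : -(k - nums[j]) = nums[j] - k := by ring
  have h1 := pvIdx_bisect (pvPiv nums) 0 j (nums[j] - k)
  have h2 := pvIdx_bisect (pvPiv nums) 0 j (k - nums[j])
  simp only [Nat.zero_add, Nat.cast_zero] at h1 h2
  have hlen : (((pvIdx (pvPiv nums) 0 (k - nums[j])).length : Nat) : Int)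
      = ((pvPiv nums).count (k - nums[j]) : Int) := by
    rw [pvIdx_length]
  have hsplit : ((pvPiv nums).count (k - nums[j]) : Int)
      = (((pvPiv nums).take j).count (k - nums[j]) : Int)
        + (((pvPiv nums).drop j).count (k - nums[j]) : Int) := by
    conv_lhs => rw [← List.take_append_drop j (pvPiv nums)]
    push_cast [List.count_append]
    ring
  rw [pvQ, hg, hneg]
  rw [h1, hlen, h2, hsplit]
  ring

lemma B_closed (nums : List Int) (k : Int) :
    ways_to_partition_alt nums k
      = List.foldl max (pvUnch nums) ((List.range nums.length).map (pvQ nums k)) := by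
  unfold ways_to_partition_alt
  dsimp only
  have hp := pivots_eq nums
  dsimp only at hp
  rw [hp]
  have hb0 : (((pvIdx (pvPiv nums) 0 0).length : Nat) : Int) = pvUnch nums := by
    rw [pvIdx_length, pvUnch]
  have hmap : (PySem.List.enumerate nums).map
      (fun p => (((pvIdx (pvPiv nums) 0 (-(k - p.2))).takeWhile (fun a => a < p.1)).length : Int)
        + ((((pvIdx (pvPiv nums) 0 (k - p.2)).length : Nat) : Int)
          - (((pvIdx (pvPiv nums) 0 (k - p.2)).takeWhile (fun a => a < p.1)).length : Int)))
      = (List.range nums.length).map (pvQ nums k) := by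
    apply List.ext_getElem
    · simp [PySem.List.length_enumerate]
    · intro j h1 h2
      have hj : j < nums.length := by simpa [PySem.List.length_enumerate] using h1
      simp only [List.getElem_map, PySem.List.getElem_enumerate, List.getElem_range, zero_add]
      exact B_query nums k j hj
  simp only [pos_getD, hb0]
  rw [← hmap, List.foldl_map]

-- max-fold shuffle: folding from max a b equals max a of folding from b
lemma foldl_max_max (l : List Int) : ∀ (a b : Int),
    List.foldl max (max a b) l = max a (List.foldl max b l) := by
  induction l with
  | nil => intro a b; simp
  | cons c t ih => intro a b; simp only [List.foldl_cons, max_assoc, ih]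

-- ===== VERDICT (by name: the statement is the Claim_ definition above) =====
theorem ways_to_partition_spec : Claim_equal_ways_to_partition := by
  intro nums k _hdom hne
  unfold Spec_ways_to_partition
  obtain ⟨n1, hn1⟩ : ∃ n1, nums.length = n1 + 1 := by
    cases nums with
    | nil => exact absurd rfl hne
    | cons a l => exact ⟨l.length, by simp⟩
  rw [A_closed nums k hne, B_closed nums k, hn1]
  rw [show n1 + 1 - 1 = n1 from rfl, List.range_succ_eq_map, List.map_cons, List.foldl_cons,
    List.map_map]
  simp only [Function.comp_def, Nat.succ_eq_add_one]
  rw [foldl_max_max, max_comm]
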